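-- pv_equiv track=rewrite | github.com/Sekhara17/Basic-Programs | Accenture Basic  programs.py | len_word
-- ===== SOURCE A (Python) =====
-- def len_word(str1):
--     n = len(str1)
--     word_len = 0
--     for i in range(n):
--         if str1[i] == " ":
--             word_len = 0
--         else:
--             word_len += 1
--     return word_len
-- ===== SOURCE B (Python) =====
-- def len_word(str1):
--     count = 0
--     for ch in reversed(str1):
--         if ch == " ":
--             break
--         count += 1
--     return count
-- ===== Notes on version B (the rewrite author's own statement) =====
-- stated objective: alternative
-- what changed: B scans the string backwards and stops at the first space, instead of A's forward full scan with a counter reset on every space.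
import Mathlib
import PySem

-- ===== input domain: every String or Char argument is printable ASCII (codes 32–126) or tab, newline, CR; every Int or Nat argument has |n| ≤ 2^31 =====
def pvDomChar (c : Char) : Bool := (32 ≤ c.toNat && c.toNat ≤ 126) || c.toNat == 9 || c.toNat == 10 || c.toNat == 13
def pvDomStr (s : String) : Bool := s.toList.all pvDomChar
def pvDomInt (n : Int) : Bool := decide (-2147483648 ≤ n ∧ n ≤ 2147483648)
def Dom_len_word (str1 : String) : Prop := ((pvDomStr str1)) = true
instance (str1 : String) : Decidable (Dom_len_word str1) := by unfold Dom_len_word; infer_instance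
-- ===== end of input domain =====

-- B replaces A's forward scan (reset counter on each space) by a reverse scan that stops at the first space; same return value.

-- ===== PORT A =====
-- forward loop over the characters, resetting the counter at every space
def len_word (str1 : String) : Int :=
  str1.toList.foldl (fun word_len c => if c == ' ' then 0 else word_len + 1) 0

-- ===== PORT B =====
-- helper: count leading non-space chars of the reversed list, stopping at the first space
def lenWordAltGo : List Char → Int
  | [] => 0
  | c :: rest => if c == ' ' then 0 else 1 + lenWordAltGo rest

def len_word_alt (str1 : String) : Int :=
  lenWordAltGo str1.toList.reverse

-- ===== PRECONDITION & SPEC =====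
def Spec_len_word (str1 : String) (out : Int) : Prop := out = len_word_alt str1
instance (str1 : String) (out : Int) : Decidable (Spec_len_word str1 out) := by unfold Spec_len_word; infer_instance

-- ===== CLAIM (what is proved, stated in full; the proofs are below) =====
def Claim_equal_len_word : Prop := ∀ (str1 : String), Dom_len_word str1 → Spec_len_word str1 (len_word str1)

-- ===== LEMMAS AND PROOFS =====
theorem lenWord_foldl_eq_go (l : List Char) :
    l.foldl (fun word_len c => if c == ' ' then 0 else word_len + 1) 0 = lenWordAltGo l.reverse := by
  induction l using List.reverseRecOn with
  | nil => simp [lenWordAltGo]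
  | append_singleton xs c ih =>
    simp only [beq_iff_eq] at ih
    rw [List.foldl_append, List.reverse_append]
    simp only [List.reverse_singleton, List.singleton_append, List.foldl_cons,
      List.foldl_nil, lenWordAltGo, beq_iff_eq]
    by_cases h : c = ' '
    · simp [h]
    · simp [h, ih]; omega

-- ===== VERDICT (by name: the statement is the Claim_ definition above) =====
theorem len_word_spec : Claim_equal_len_word := by
  intro s _
  unfold Spec_len_word len_word len_word_alt
  exact lenWord_foldl_eq_go s.toList
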